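-- pv_equiv track=rewrite | github.com/habdvgbej914/contrarian-analysis | fcas_utils.py | _split_telegram_chunks
-- ===== SOURCE A (Python) =====
-- _MAX_CHUNK = 4000  # Telegram max is 4096; leave margin
--
-- def _split_telegram_chunks(text: str) -> list[str]:
--     """Split text into Telegram-safe chunks.
--
--     Prefer line boundaries, but if a single line is too long we still split it
--     so we never emit an empty chunk or a chunk above the hard limit.
--     """
--     if not text:
--         return []
--
--     chunks: list[str] = []
--     current = ""
--
--     for line in text.split("\n"):
--         line_parts = [line[i : i + _MAX_CHUNK] for i in range(0, len(line), _MAX_CHUNK)] or [""]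
--
--         for part in line_parts:
--             separator = "\n" if current else ""
--             if len(current) + len(separator) + len(part) > _MAX_CHUNK:
--                 if current:
--                     chunks.append(current)
--                 current = part
--             else:
--                 current = f"{current}{separator}{part}" if current else part
--
--     if current:
--         chunks.append(current)
--
--     return chunks
-- ===== SOURCE B (Python) =====
-- _MAX_CHUNK = 4000  # Telegram max is 4096; leave margin
--
--
-- def _split_telegram_chunks(text: str) -> list[str]:
--     """Split text into Telegram-safe chunks.
--
--     Flatten the text into a flat list of segments (each at most _MAX_CHUNK
--     characters, one empty segment per empty line), then consume the segments
--     front to back, extracting one whole chunk per outer iteration: take the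
--     maximal run of segments whose '\n'-join fits in _MAX_CHUNK and join it
--     once.  Empty segments found while no chunk is open contribute nothing.
--     """
--     if not text:
--         return []
--
--     segments = []
--     for line in text.split("\n"):
--         if line:
--             for i in range(0, len(line), _MAX_CHUNK):
--                 segments.append(line[i:i + _MAX_CHUNK])
--         else:
--             segments.append("")
--
--     chunks = []
--     rest = segments[::-1]          # consume front-to-back via O(1) pop()
--     while rest:
--         first = rest.pop()
--         if not first:
--             continue               # no chunk open: an empty segment adds nothing
--         batch, size = [first], len(first)
--         while rest and size + 1 + len(rest[-1]) <= _MAX_CHUNK: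
--             size += 1 + len(rest[-1])
--             batch.append(rest.pop())
--         chunks.append("\n".join(batch))
--     return chunks
-- ===== Notes on version B (the rewrite author's own statement) =====
-- stated objective: alternative
-- what changed: Replaces A's per-part state machine (a growing `current` string with separator/flush logic inside a nested line/part loop) by chunk-at-a-time batch extraction: flatten the text into a flat segment list, then per outer iteration greedily consume the maximal run of segments whose joined size fits, join that batch once, and drop empty segments seen while no chunk is open.
import Mathlib
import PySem

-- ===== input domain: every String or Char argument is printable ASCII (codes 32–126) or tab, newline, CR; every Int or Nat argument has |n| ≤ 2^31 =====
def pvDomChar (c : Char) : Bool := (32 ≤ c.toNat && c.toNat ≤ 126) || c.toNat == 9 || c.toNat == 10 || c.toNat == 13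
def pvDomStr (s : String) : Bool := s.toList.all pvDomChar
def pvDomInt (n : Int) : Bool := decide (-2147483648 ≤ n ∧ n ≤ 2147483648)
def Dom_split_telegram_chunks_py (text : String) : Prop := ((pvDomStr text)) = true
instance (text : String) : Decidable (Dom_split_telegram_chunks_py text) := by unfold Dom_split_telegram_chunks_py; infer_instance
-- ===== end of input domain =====

-- B replaces A's per-part state machine (growing `current` with separator/flush logic) by
-- chunk-at-a-time batch extraction over a flat segment list, joining each batch once (alternative).

-- ===== PORT A =====
-- line_parts = [line[i:i+4000] for i in range(0, len(line), 4000)] or [""]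
def pvLinePartsA (line : List Char) : List (List Char) :=
  let ps := (PySem.List.pyRange 0 (PySem.Chars.len line) 4000).map
      (fun i => PySem.List.slice line (some i) (some (i + 4000)))
  if ps.isEmpty then [[]] else ps

-- the body of A's inner loop over (chunks, current)
def pvStepA (st : List (List Char) × List Char) (part : List Char) :
    List (List Char) × List Char :=
  let sep : List Char := if st.2.isEmpty then [] else ['\n']
  if (st.2.length : Int) + sep.length + part.length > 4000 then
    ((if st.2.isEmpty then st.1 else st.1 ++ [st.2]), part)
  else
    (st.1, if st.2.isEmpty then part else st.2 ++ sep ++ part)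

def split_telegram_chunks_py (text : String) : List String :=
  if text.toList.isEmpty then [] else
    let st := (PySem.Chars.splitOn text.toList ['\n']).foldl
        (fun st line => (pvLinePartsA line).foldl pvStepA st) ([], [])
    (if st.2.isEmpty then st.1 else st.1 ++ [st.2]).map (fun cs => String.ofList cs)

-- ===== PORT B =====
-- flatten a line into ≤4000-char segments (empty line -> one "" segment)
def pvSegB (line : List Char) : List (List Char) :=
  if line.isEmpty then [[]]
  else (PySem.List.pyRange 0 (PySem.Chars.len line) 4000).map
      (fun i => PySem.List.slice line (some i) (some (i + 4000)))

-- B's inner while: extend the batch while the next segment still fits the joined size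
def pvTake (batch : List (List Char)) (size : Int) :
    List (List Char) → List (List Char) × List (List Char)
  | [] => (batch, [])
  | r :: rs =>
      if size + 1 + (r.length : Int) ≤ 4000 then
        pvTake (batch ++ [r]) (size + 1 + (r.length : Int)) rs
      else (batch, r :: rs)

-- the remainder returned by pvTake is a suffix of its input (termination helper for pvPack)
theorem pvTake_snd_le (batch : List (List Char)) (size : Int)
    (rest : List (List Char)) : (pvTake batch size rest).2.length ≤ rest.length := by
  induction rest generalizing batch size with
  | nil => simp [pvTake]
  | cons r rs ih =>
    simp only [pvTake]
    split_ifs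
    · exact le_trans (ih _ _) (by simp)
    · simp

-- B's outer while: extract one whole chunk per iteration, consuming front-to-back
def pvPack : List (List Char) → List (List Char)
  | [] => []
  | s :: rest =>
      if s.isEmpty then pvPack rest
      else
        let br := pvTake [s] (s.length : Int) rest
        PySem.Chars.join ['\n'] br.1 :: pvPack br.2
termination_by segs => segs.length
decreasing_by
  · simp
  · have := pvTake_snd_le [s] (s.length : Int) rest
    simp only [List.length_cons]
    omega

def split_telegram_chunks_py_alt (text : String) : List String :=
  if text.toList.isEmpty then [] else
    let segments := (PySem.Chars.splitOn text.toList ['\n']).flatMap pvSegB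
    (pvPack segments).map (fun cs => String.ofList cs)

-- ===== PRECONDITION & SPEC =====
def Spec_split_telegram_chunks_py (text : String) (out : List String) : Prop := out = split_telegram_chunks_py_alt text
instance (text : String) (out : List String) : Decidable (Spec_split_telegram_chunks_py text out) := by unfold Spec_split_telegram_chunks_py; infer_instance

-- ===== CLAIM (what is proved, stated in full; the proofs are below) =====
def Claim_equal_split_telegram_chunks_py : Prop := ∀ (text : String), Dom_split_telegram_chunks_py text → Spec_split_telegram_chunks_py text (split_telegram_chunks_py text)

-- ===== LEMMAS AND PROOFS =====

-- A's `or [""]` and B's `if line:` produce the same per-line segment list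
lemma pvSeg_eq (line : List Char) : pvLinePartsA line = pvSegB line := by
  unfold pvLinePartsA pvSegB
  by_cases h : line = []
  · subst h
    have h4 : PySem.List.pyRange 0 0 4000 = ([] : List Int) := by decide
    simp [PySem.Chars.len_eq, h4]
  · have hE : line.isEmpty = false := by simp [h]
    have hlen : (0 : Int) < (line.length : Int) := by
      have := List.length_pos_iff.mpr h
      exact_mod_cast this
    have hmem : (0 : Int) ∈ PySem.List.pyRange 0 ((line.length : Int)) 4000 := by
      rw [PySem.List.mem_pyRange_iff_of_pos (by norm_num)]
      exact ⟨le_refl _, hlen, by simp⟩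
    have hne : ((PySem.List.pyRange 0 ((line.length : Int)) 4000).map
        (fun i => PySem.List.slice line (some i) (some (i + 4000)))).isEmpty = false := by
      rw [List.isEmpty_eq_false_iff]
      intro hc
      rw [List.map_eq_nil_iff.mp hc] at hmem
      exact absurd hmem List.not_mem_nil
    simp [PySem.Chars.len_eq, hne, hE]

-- "\n".join(b ++ [p]) for a nonempty b
lemma join_append_singleton (b : List (List Char)) (p : List Char) (h : b ≠ []) :
    PySem.Chars.join ['\n'] (b ++ [p]) = PySem.Chars.join ['\n'] b ++ '\n' :: p := by
  induction b with
  | nil => exact absurd rfl h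
  | cons x t ih =>
    cases t with
    | nil => simp [PySem.Chars.join, List.intercalate, List.intersperse]
    | cons y u =>
      have := ih (by simp)
      simp only [PySem.Chars.join, List.intercalate, List.cons_append,
        List.intersperse, List.flatten_cons] at this ⊢
      simp [this]

-- join over an appended tail, for a nonempty head list
lemma join_append (b : List (List Char)) (t : List (List Char)) (h : b ≠ []) :
    PySem.Chars.join ['\n'] (b ++ t)
      = PySem.Chars.join ['\n'] b ++ t.flatMap (fun x => '\n' :: x) := by
  induction t generalizing b with
  | nil => simp
  | cons x xs ih =>
    have h1 : b ++ x :: xs = (b ++ [x]) ++ xs := by simp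
    rw [h1, ih (b ++ [x]) (by simp), join_append_singleton b x h]
    simp

-- pvTake's consumed prefix and remainder do not depend on the batch already taken
lemma pvTake_batch (rest : List (List Char)) (b : List (List Char)) (size : Int) :
    pvTake b size rest
      = (b ++ (pvTake [] size rest).1, (pvTake [] size rest).2) := by
  induction rest generalizing b size with
  | nil => simp [pvTake]
  | cons r rs ih =>
    simp only [pvTake]
    split_ifs
    · rw [ih (b ++ [r]), ih ([] ++ [r])]
      simp
    · simp

-- flush A's final state into its chunk list
def pvFlushA (st : List (List Char) × List Char) : List (List Char) :=
  if st.2.isEmpty then st.1 else st.1 ++ [st.2]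

-- A's step only appends to the chunk list
lemma stepA_split (c : List (List Char)) (cur part : List Char) :
    pvStepA (c, cur) part
      = (c ++ (pvStepA ([], cur) part).1, (pvStepA ([], cur) part).2) := by
  unfold pvStepA
  by_cases hc : cur.isEmpty <;> simp only [hc] <;> split_ifs <;> simp

lemma foldl_stepA_split (segs : List (List Char)) (c : List (List Char)) (cur : List Char) :
    segs.foldl pvStepA (c, cur)
      = (c ++ (segs.foldl pvStepA ([], cur)).1, (segs.foldl pvStepA ([], cur)).2) := by
  induction segs generalizing c cur with
  | nil => simp
  | cons s t ih =>
    simp only [List.foldl_cons]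
    rw [stepA_split c cur s, ih, ih ((pvStepA ([], cur) s).1)]
    cases hst : pvStepA ([], cur) s
    simp

-- B's continuation of A's run from current chunk content p
def pvPackFrom (p : List Char) (segs : List (List Char)) : List (List Char) :=
  if p.isEmpty then pvPack segs
  else
    let br := pvTake [p] (p.length : Int) segs
    PySem.Chars.join ['\n'] br.1 :: pvPack br.2

lemma join_single (p : List Char) : PySem.Chars.join ['\n'] [p] = p := by
  simp [PySem.Chars.join, List.intercalate, List.intersperse]

-- one unfolding of B's outer loop, phrased through pvPackFrom
lemma pvPack_cons (q : List Char) (qs : List (List Char)) :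
    pvPack (q :: qs) = pvPackFrom q qs := by
  rw [pvPack.eq_def]
  unfold pvPackFrom
  by_cases hq : q = []
  · simp [hq]
  · have hqE : q.isEmpty = false := by simp [hq]
    simp [hqE]

-- the central invariant: flushing A's fold from current = p gives B's packing from p
lemma main_inv (segs : List (List Char)) (p : List Char) :
    pvFlushA (segs.foldl pvStepA ([], p)) = pvPackFrom p segs := by
  induction segs generalizing p with
  | nil =>
    by_cases hp : p = []
    · subst hp; simp [pvFlushA, pvPackFrom, pvPack]
    · have hE : p.isEmpty = false := by simp [hp]
      simp [pvFlushA, pvPackFrom, pvTake, hE, pvPack]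
  | cons q qs ih =>
    by_cases hp : p = []
    · subst hp
      have hstep : pvStepA ([], []) q = ([], q) := by
        unfold pvStepA
        simp only [List.isEmpty_nil, if_true]
        split_ifs <;> simp
      have hL : pvFlushA ((q :: qs).foldl pvStepA ([], [])) = pvPackFrom q qs := by
        simp only [List.foldl_cons, hstep]; exact ih q
      rw [hL]
      show pvPackFrom q qs = pvPackFrom [] (q :: qs)
      rw [show pvPackFrom [] (q :: qs) = pvPack (q :: qs) by simp [pvPackFrom]]
      rw [pvPack_cons]
    · have hE : p.isEmpty = false := by simp [hp]
      by_cases hfit : (p.length : Int) + 1 + (q.length : Int) ≤ 4000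
      · -- q joins the current chunk
        have hstep : pvStepA ([], p) q = ([], p ++ '\n' :: q) := by
          unfold pvStepA
          simp only [hE, Bool.false_eq_true, if_false, List.length_cons,
            List.length_nil]
          rw [if_neg (by push_cast; omega)]
          simp
        have hL := ih (p ++ '\n' :: q)
        simp only [List.foldl_cons, hstep]
        rw [hL]
        have hpE' : (p ++ '\n' :: q).isEmpty = false := by simp
        unfold pvPackFrom
        simp only [hpE', Bool.false_eq_true, if_false, hE, pvTake]
        rw [if_pos (by omega)]
        have hsz : ((p ++ '\n' :: q).length : Int) = (p.length : Int) + 1 + q.length := by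
          have hlen : (p ++ '\n' :: q).length = p.length + (q.length + 1) := by simp
          rw [hlen]; push_cast; ring
        rw [hsz, pvTake_batch qs [p ++ '\n' :: q], pvTake_batch qs ([p] ++ [q])]
        have hjoin : ∀ C, PySem.Chars.join ['\n'] ([p ++ '\n' :: q] ++ C)
            = PySem.Chars.join ['\n'] ([p, q] ++ C) := by
          intro C
          rw [join_append [p ++ '\n' :: q] C (by simp), join_append [p, q] C (by simp),
            join_single]
          have : PySem.Chars.join ['\n'] [p, q] = p ++ '\n' :: q := by
            simp [PySem.Chars.join, List.intercalate, List.intersperse]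
          rw [this]
        have h2 := hjoin ((pvTake [] ((p.length : Int) + 1 + (q.length : Int)) qs).1)
        simp only [List.cons_append, List.nil_append] at h2 ⊢
        rw [h2]
      · -- q does not fit: A flushes, B closes the batch
        have hstep : pvStepA ([], p) q = ([p], q) := by
          unfold pvStepA
          simp only [hE, Bool.false_eq_true, if_false, List.length_cons,
            List.length_nil]
          rw [if_pos (by push_cast; omega)]
          simp
        simp only [List.foldl_cons, hstep]
        rw [foldl_stepA_split qs [p] q]
        have hL : pvFlushA (([p] ++ (qs.foldl pvStepA ([], q)).1,
            (qs.foldl pvStepA ([], q)).2)) = [p] ++ pvFlushA (qs.foldl pvStepA ([], q)) := by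
          unfold pvFlushA
          split_ifs <;> simp
        rw [hL, ih q]
        have hcond : ¬((p.length : Int) + 1 + (q.length : Int) ≤ 4000) := hfit
        have hR : pvPackFrom p (q :: qs) = p :: pvPack (q :: qs) := by
          unfold pvPackFrom
          simp only [hE, Bool.false_eq_true, if_false, pvTake]
          rw [if_neg hcond]
          simp
        rw [hR, pvPack_cons]
        simp

-- ===== VERDICT (by name: the statement is the Claim_ definition above) =====
theorem split_telegram_chunks_py_spec : Claim_equal_split_telegram_chunks_py := by
  intro text _
  unfold Spec_split_telegram_chunks_py split_telegram_chunks_py split_telegram_chunks_py_alt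
  by_cases h : text.toList.isEmpty
  · simp [h]
  · rw [if_neg h, if_neg h]
    rw [show pvLinePartsA = pvSegB from funext pvSeg_eq]
    rw [← List.foldl_flatMap]
    have hmain := main_inv ((PySem.Chars.splitOn text.toList ['\n']).flatMap pvSegB) []
    rw [show pvPackFrom [] ((PySem.Chars.splitOn text.toList ['\n']).flatMap pvSegB)
        = pvPack ((PySem.Chars.splitOn text.toList ['\n']).flatMap pvSegB)
      from by simp [pvPackFrom]] at hmain
    exact congrArg (List.map (fun cs => String.ofList cs)) hmain
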